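-- pv_equiv track=rewrite | github.com/sumina-codewell/kata | 프로그래머스/1/135808. 과일 장수/과일 장수.py | solution
-- ===== SOURCE A (Python) =====
-- def solution(k, m, score):
--     sorted_score = sorted(score, reverse=True)
--     answer = []
--     box = [sorted_score[i*m : m*(i+1)] for i in range(0, (len(sorted_score)+m-1)//m)]
--     for i in box:
--         if len(i) == m:
--             value = min(i) * m
--             answer.append(value)
--     return sum(answer)
-- ===== SOURCE B (Python) =====
-- def solution(k, m, score):
--     # full boxes of m are the top n//m*m scores; each box's min sits at a
--     # fixed stride in the ascending sort: indices n%m, n%m+m, ..., n-m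
--     if m <= 0:
--         return 0
--     s = sorted(score)
--     return m * sum(s[i] for i in range(len(score) % m, len(score), m))
-- ===== Notes on version B (the rewrite author's own statement) =====
-- stated objective: simpler
-- what changed: Instead of descending-sorting, materialising every box slice, testing its length and scanning each box for its minimum, B sorts once ascending and reads each full box's minimum directly at the fixed stride n%m, n%m+m, ..., n-m, summing those and multiplying by m.
import Mathlib
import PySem

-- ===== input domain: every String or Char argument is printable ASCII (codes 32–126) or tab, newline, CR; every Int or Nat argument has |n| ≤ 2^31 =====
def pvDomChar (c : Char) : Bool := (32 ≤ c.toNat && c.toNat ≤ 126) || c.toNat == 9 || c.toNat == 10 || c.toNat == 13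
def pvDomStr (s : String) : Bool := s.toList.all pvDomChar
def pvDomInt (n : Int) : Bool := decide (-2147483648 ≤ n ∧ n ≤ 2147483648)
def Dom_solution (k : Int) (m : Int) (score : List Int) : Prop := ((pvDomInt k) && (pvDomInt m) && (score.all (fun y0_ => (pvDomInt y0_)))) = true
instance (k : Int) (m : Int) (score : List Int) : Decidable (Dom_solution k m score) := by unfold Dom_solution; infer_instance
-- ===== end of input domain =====

-- B replaces A's explicit box-building and per-box min scans by reading each full
-- box's minimum at a fixed stride of the ascending sort (simpler).

-- ===== PORT A =====
def solution (k : Int) (m : Int) (score : List Int) : Int :=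
  let sorted_score := PySem.List.sorted score (fun x => x) true
  let box := (PySem.List.pyRange 0 (PySem.Int.floordiv ((sorted_score.length : Int) + m - 1) m)).map
    (fun i => PySem.List.slice sorted_score (some (i * m)) (some (m * (i + 1))))
  let answer := box.foldl (fun acc i =>
    if ((i.length : Int) == m) then
      -- min(i): the `.getD 0` branch is unreachable — under Pre_ (m ≠ 0) the
      -- guard len(i) == m forces i nonempty, exactly where Python's min returns
      acc ++ [(PySem.List.min? i (fun x => x)).getD 0 * m]
    else acc) []
  answer.sum

-- ===== PORT B =====
def solution_alt (k : Int) (m : Int) (score : List Int) : Int :=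
  if m ≤ 0 then 0
  else
    let s := PySem.List.sorted score (fun x => x) false
    m * ((PySem.List.pyRange (PySem.Int.mod (score.length : Int) m) (score.length : Int) m).map
      (fun i => PySem.List.pyGetD s i 0)).sum   -- s[i]: every generated index is in range

-- ===== PRECONDITION & SPEC =====
-- Pre_ excludes only m = 0, where A raises ZeroDivisionError on (len+m-1)//m.
def Pre_solution (k : Int) (m : Int) (score : List Int) : Prop := m ≠ 0
instance (k : Int) (m : Int) (score : List Int) : Decidable (Pre_solution k m score) := by unfold Pre_solution; infer_instance
def pvWitness_solution : Int × Int × List Int := (4, 2, [1, 2, 3, 1, 2])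

def Spec_solution (k : Int) (m : Int) (score : List Int) (out : Int) : Prop := out = solution_alt k m score
instance (k : Int) (m : Int) (score : List Int) (out : Int) : Decidable (Spec_solution k m score out) := by unfold Spec_solution; infer_instance

-- ===== CLAIM (what is proved, stated in full; the proofs are below) =====
def Claim_equal_solution : Prop := ∀ (k : Int) (m : Int) (score : List Int), Dom_solution k m score → Pre_solution k m score → Spec_solution k m score (solution k m score)

-- ===== LEMMAS AND PROOFS =====

-- Python's min over a list whose least value is x
theorem pvMinEq (l : List Int) (x : Int) (hx : x ∈ l) (hle : ∀ y ∈ l, x ≤ y) :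
    PySem.List.min? l (fun v => v) = some x := by
  obtain ⟨z, hz⟩ : ∃ z, PySem.List.min? l (fun v => v) = some z := by
    cases h : PySem.List.min? l (fun v => v) with
    | none => rw [PySem.List.min?_eq_none_iff] at h; subst h; simp at hx
    | some z => exact ⟨z, rfl⟩
  rw [hz]
  exact congrArg some (le_antisymm (PySem.List.min?_isMin hz x hx)
    (hle z (PySem.List.min?_mem hz)))

theorem pvFilterRange (q Q : ℕ) (h : q ≤ Q) :
    (List.range Q).filter (fun j => decide (j < q)) = List.range q := by
  induction Q with
  | zero => simp_all
  | succ Q ih =>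
    rw [List.range_succ, List.filter_append]
    by_cases hq : q = Q + 1
    · subst hq
      rw [List.filter_eq_self.mpr (by intro a ha; simp at ha ⊢; omega),
          List.filter_eq_self.mpr (by intro a ha; simp at ha ⊢; omega),
          ← List.range_succ]
    · have hle : q ≤ Q := by omega
      rw [ih hle, List.filter_cons]
      simp [show ¬ Q < q by omega]

-- stable descending sort of Ints (identity key) is the reverse of the ascending one
theorem pvSortedRev (xs : List Int) :
    PySem.List.sorted xs (fun x => x) true = (PySem.List.sorted xs (fun x => x) false).reverse := by
  apply List.eq_of_perm_of_sorted (le := fun a b => b ≤ a)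
  · intro a b _ _ h1 h2; omega
  · exact PySem.List.sorted_pairwise_rev xs _
  · rw [List.pairwise_reverse]
    exact PySem.List.sorted_pairwise xs _
  · exact (PySem.List.sorted_perm xs _ true).trans
      ((PySem.List.sorted_perm xs _ false).symm.trans (List.reverse_perm _).symm)

-- index arithmetic: the min of full box j sits at reversed position r + (q-1-j)*M
theorem pvIdx (M q r N i j : ℕ) (hM : 0 < M) (hdm : M * q + r = N) (hj : j < q) (hi : i = q - 1 - j) :
    N - 1 - (j * M + (M - 1)) = r + i * M ∧ j * M + (M - 1) < N := by
  have hq' : q = i + j + 1 := by omega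
  have hexp : M * q = i * M + j * M + M := by rw [hq']; ring
  omega

-- A for positive m: the sum of the descending sort's elements at the full boxes' ends
theorem pvA (k : Int) (score : List Int) (M : ℕ) (hM : 0 < M) :
    solution k (M : Int) score =
      ∑ j ∈ Finset.range (score.length / M),
        (PySem.List.sorted score (fun x => x) true).getD (j * M + (M - 1)) 0 * (M : Int) := by
  simp only [solution]
  set d := PySem.List.sorted score (fun x => x) true with hd
  have hlen : d.length = score.length := PySem.List.length_sorted score _ _
  set N := score.length with hN
  have hcast : ((N : Int) + (M : Int) - 1) = ((N + M - 1 : ℕ) : Int) := by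
    push_cast [Nat.cast_sub (by omega : 1 ≤ N + M)]; ring
  rw [hlen, hcast, PySem.Int.floordiv_natCast, PySem.List.pyRange_zero_natCast]
  rw [List.map_map]
  have hbox : ((fun i => PySem.List.slice d (some (i * (M:Int))) (some ((M:Int) * (i + 1)))) ∘ (fun j : ℕ => (j : Int)))
      = fun j : ℕ => (d.drop (j * M)).take M := by
    funext j
    have h1 : ((j : Int) * (M : Int)) = ((j * M : ℕ) : Int) := by push_cast; ring
    have h2 : ((M : Int) * ((j : Int) + 1)) = ((j * M : ℕ) : Int) + (M : Int) := by push_cast; ring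
    simp only [Function.comp, h1, h2, PySem.List.slice_natCast_add]
  rw [hbox, PySem.List.foldl_append_if, List.nil_append, List.filter_map, List.map_map]
  have hfilter : (List.range ((N + M - 1) / M)).filter
      ((fun i : List Int => ((i.length : Int) == (M : Int))) ∘ fun j => (d.drop (j * M)).take M)
      = List.range (N / M) := by
    have heq : ((fun i : List Int => ((i.length : Int) == (M : Int))) ∘ fun j => (d.drop (j * M)).take M)
        = fun j : ℕ => decide (j < N / M) := by
      funext j
      simp only [Function.comp, List.length_take, List.length_drop, hlen]
      have h1 : (j + 1) * M = j * M + M := by ring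
      have h2 : j + 1 ≤ N / M ↔ (j + 1) * M ≤ N := Nat.le_div_iff_mul_le hM
      by_cases hc : j < N / M
      · have hfull : j * M + M ≤ N := by have := h2.mp (by omega); omega
        have hmin : min M (N - j * M) = M := by omega
        simp [hmin, hc]
      · have hnot : ¬ j * M + M ≤ N := fun hcon => hc (by have := h2.mpr (by omega); omega)
        simp [hc]
        omega
    rw [heq, pvFilterRange _ _ (Nat.div_le_div_right (by omega))]
  rw [hfilter]
  rw [List.map_congr_left (l := List.range (N / M))
      (f := (fun i : List Int => (PySem.List.min? i (fun x => x)).getD 0 * (M:Int)) ∘ fun j => (d.drop (j * M)).take M)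
      (g := fun j : ℕ => d.getD (j * M + (M - 1)) 0 * (M : Int)) ?_]
  · exact rfl
  · intro j hj
    have hj' : j < N / M := List.mem_range.mp hj
    have hfull : j * M + M ≤ N := by
      have h1 : (j + 1) * M = j * M + M := by ring
      have := (Nat.le_div_iff_mul_le hM).mp (by omega : j + 1 ≤ N / M)
      omega
    have hidx : j * M + (M - 1) < N := by omega
    have hgetD : d.getD (j * M + (M - 1)) 0 = d[j * M + (M - 1)]'(by omega) := by
      rw [List.getD_eq_getElem?_getD, List.getElem?_eq_getElem (by omega)]; rfl
    have hboxlen : ((d.drop (j * M)).take M).length = M := by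
      simp [hlen]; omega
    have hmem : d[j * M + (M - 1)]'(by omega) ∈ (d.drop (j * M)).take M := by
      have : ((d.drop (j * M)).take M)[M - 1]'(by omega) = d[j * M + (M - 1)]'(by omega) := by
        simp [List.getElem_take, List.getElem_drop]
      rw [← this]
      exact List.getElem_mem _
    have hpair := PySem.List.sorted_pairwise_rev score (fun x : Int => x)
    rw [← hd] at hpair
    have hmono : ∀ p q (hp : p < d.length) (hq : q < d.length), p ≤ q → d[q] ≤ d[p] := by
      intro p q hp hq hpq
      rcases Nat.eq_or_lt_of_le hpq with h | h
      · subst h; exact le_refl _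
      · exact (List.pairwise_iff_getElem.mp hpair) p q hp hq h
    have hle : ∀ y ∈ (d.drop (j * M)).take M, d[j * M + (M - 1)]'(by omega) ≤ y := by
      intro y hy
      obtain ⟨i, hi, hiy⟩ := List.mem_iff_getElem.mp hy
      rw [hboxlen] at hi
      have : ((d.drop (j * M)).take M)[i]'(by omega) = d[j * M + i]'(by omega) := by
        simp [List.getElem_take, List.getElem_drop]
      rw [← hiy, this]
      exact hmono _ _ (by omega) (by omega) (by omega)
    simp only [Function.comp]
    rw [pvMinEq _ _ hmem hle, hgetD]
    rfl

-- B for positive m: m times the sum of the ascending sort at the stride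
theorem pvB (k : Int) (score : List Int) (M : ℕ) (hM : 0 < M) :
    solution_alt k (M : Int) score =
      (M : Int) * ∑ i ∈ Finset.range (score.length / M),
        (PySem.List.sorted score (fun x => x) false).getD (score.length % M + i * M) 0 := by
  simp only [solution_alt]
  rw [if_neg (by exact_mod_cast Nat.not_succ_le_zero (M-1) ∘ fun h => by omega : ¬ (M : Int) ≤ 0)]
  set a := PySem.List.sorted score (fun x => x) false with ha
  set N := score.length with hN
  set r := N % M with hr
  rw [PySem.Int.mod_natCast, PySem.List.pyRange_of_pos _ _ (by exact_mod_cast hM)]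
  have hcnt : (if (r : Int) < (N : Int) then (((N : Int) - (r : Int) + (M : Int) - 1) / (M : Int)).toNat else 0) = N / M := by
    by_cases hrN : (r : Int) < (N : Int)
    · rw [if_pos hrN]
      have hrle : r ≤ N := Nat.mod_le N M
      have hcast : (N : Int) - (r : Int) + (M : Int) - 1 = ((N - r + M - 1 : ℕ) : Int) := by
        push_cast [Nat.cast_sub hrle, Nat.cast_sub (by omega : 1 ≤ N - r + M)]; ring
      rw [hcast, ← Int.natCast_div, Int.toNat_natCast]
      have hdm := Nat.div_add_mod N M
      have hsub : N - r + M - 1 = M * (N / M) + (M - 1) := by omega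
      rw [hsub, Nat.mul_add_div hM, Nat.div_eq_of_lt (show M - 1 < M by omega), Nat.add_zero]
    · rw [if_neg hrN]
      have : N ≤ r := by exact_mod_cast Int.not_lt.mp hrN
      have hdm := Nat.div_add_mod N M
      have hmlt : r < M := Nat.mod_lt _ hM
      symm
      apply Nat.div_eq_of_lt
      omega
  rw [hcnt, List.map_map]
  congr 1
  have hfun : ((fun i => PySem.List.pyGetD a i 0) ∘ fun k : ℕ => (r : Int) + (M : Int) * (k : Int))
      = fun i : ℕ => a.getD (r + i * M) 0 := by
    funext i
    have : (r : Int) + (M : Int) * (i : Int) = ((r + i * M : ℕ) : Int) := by push_cast; ring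
    simp only [Function.comp, this, PySem.List.pyGetD_natCast]
  rw [hfun]
  rfl

-- A = B for positive m: reflect the sum and factor out m
theorem pvAB (k : Int) (score : List Int) (M : ℕ) (hM : 0 < M) :
    solution k (M : Int) score = solution_alt k (M : Int) score := by
  rw [pvA k score M hM, pvB k score M hM]
  set a := PySem.List.sorted score (fun x => x) false with ha
  have halen : a.length = score.length := PySem.List.length_sorted score _ _
  set N := score.length with hN
  set q := N / M with hq
  set r := N % M with hr
  have hdm : M * q + r = N := Nat.div_add_mod N M
  have hterm : ∀ j < q, (PySem.List.sorted score (fun x => x) true).getD (j * M + (M - 1)) 0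
      = a.getD (r + (q - 1 - j) * M) 0 := by
    intro j hj
    rw [pvSortedRev, ← ha]
    obtain ⟨hidx, hjm⟩ := pvIdx M q r N (q - 1 - j) j hM hdm hj rfl
    rw [List.getD_eq_getElem?_getD, List.getD_eq_getElem?_getD,
        List.getElem?_reverse (by rw [halen]; exact hjm), halen, hidx]
  calc ∑ j ∈ Finset.range q, (PySem.List.sorted score (fun x => x) true).getD (j * M + (M - 1)) 0 * (M : Int)
      = ∑ j ∈ Finset.range q, a.getD (r + (q - 1 - j) * M) 0 * (M : Int) := by
        apply Finset.sum_congr rfl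
        intro j hj
        rw [hterm j (Finset.mem_range.mp hj)]
    _ = ∑ j ∈ Finset.range q, a.getD (r + j * M) 0 * (M : Int) :=
        Finset.sum_range_reflect (fun j => a.getD (r + j * M) 0 * (M : Int)) q
    _ = (M : Int) * ∑ i ∈ Finset.range q, a.getD (r + i * M) 0 := by
        rw [← Finset.sum_mul, mul_comm]

-- A for negative m: no box can have negative length, so nothing is summed
theorem pvNeg (k : Int) (m : Int) (score : List Int) (hm : m < 0) : solution k m score = 0 := by
  simp only [solution]
  rw [PySem.List.foldl_append_if, List.nil_append, List.filter_eq_nil_iff.mpr, List.map_nil, List.sum_nil]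
  intro i _
  have : ¬ ((i.length : Int) = m) := by
    intro h
    have : (0 : Int) ≤ (i.length : Int) := Int.natCast_nonneg _
    omega
  simp [this]

-- ===== VERDICT (by name: the statement is the Claim_ definition above) =====
theorem solution_spec : Claim_equal_solution := by
  intro k m score _ hpre
  unfold Pre_solution at hpre
  unfold Spec_solution
  rcases lt_trichotomy m 0 with hneg | hzero | hpos
  · rw [pvNeg k m score hneg]
    simp only [solution_alt]
    rw [if_pos hneg.le]
  · exact absurd hzero hpre
  · have hcast : m = ((m.toNat : ℕ) : Int) := (Int.toNat_of_nonneg hpos.le).symm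
    rw [hcast]
    exact pvAB k score m.toNat (by omega)
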